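-- pv_equiv track=rewrite | github.com/WooJin1993/coding_test | 20th/crane-claw-machine-game/solution.py | solution
-- ===== SOURCE A (Python) =====
-- from collections import deque
-- from collections import deque
--
-- def solution(board, moves):
--     board = [deque(filter(lambda x: x > 0, col)) for col in zip(*board)]
--     basket = []
--     answer = 0
--
--     for move in moves:
--         column = board[move - 1]
--
--         if not column:
--             continue
--
--         doll = column.popleft()
--
--         if basket and basket[-1] == doll:
--             basket.pop()
--             answer += 2
--         else:
--             basket.append(doll)
--
--     return answer
-- ===== SOURCE B (Python) =====
-- def solution(board, moves):
--     # Lazy column scan: keep one row pointer per column and read the grid in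
--     # place, skipping empty cells on demand instead of prebuilding columns.
--     nrows = len(board)
--     top = [0] * (len(board[0]) if board else 0)
--     stack = []
--     answer = 0
--     for move in moves:
--         c = move - 1
--         r = top[c]
--         while r < nrows and board[r][c] <= 0:
--             r += 1
--         if r == nrows:
--             top[c] = r
--             continue
--         top[c] = r + 1
--         doll = board[r][c]
--         if stack and stack[-1] == doll:
--             stack.pop()
--             answer += 2
--         else:
--             stack.append(doll)
--     return answer
-- ===== Notes on version B (the rewrite author's own statement) =====
-- stated objective: alternative
-- what changed: Replaces the upfront transpose-and-filter into per-column deques by lazy per-column row pointers that scan the raw grid downward past empty cells only when a column is actually played; Pre_ excludes ragged boards, where A's zip() silently truncates rows to the shortest and either value is defensible, and moves indexing outside the columns, where A raises IndexError.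
-- outside the precondition, e.g. on solution([[0, 5], [5]], [0, 0]): A returns 0, B returns 2
import Mathlib
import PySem

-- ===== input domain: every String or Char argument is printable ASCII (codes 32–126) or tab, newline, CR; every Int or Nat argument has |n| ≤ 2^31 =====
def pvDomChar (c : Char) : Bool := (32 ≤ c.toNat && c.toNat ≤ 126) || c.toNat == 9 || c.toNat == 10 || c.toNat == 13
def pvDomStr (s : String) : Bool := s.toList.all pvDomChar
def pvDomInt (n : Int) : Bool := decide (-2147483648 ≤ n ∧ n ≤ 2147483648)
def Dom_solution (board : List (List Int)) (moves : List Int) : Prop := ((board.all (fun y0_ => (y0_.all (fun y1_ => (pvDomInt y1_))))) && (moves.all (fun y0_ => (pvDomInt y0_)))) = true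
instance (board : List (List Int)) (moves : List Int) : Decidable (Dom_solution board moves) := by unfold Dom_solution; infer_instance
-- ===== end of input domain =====

-- B replaces A's upfront transpose + filter into per-column deques by lazy per-column
-- row pointers over the raw grid (objective: alternative; neither program mutates the
-- caller's arguments observably — A pops from freshly built deques, B only moves its
-- own pointers).


-- ===== PORT A =====
-- number of columns zip(*board) yields = min row length (0 for an empty board)
def pvMinLen (board : List (List Int)) : Nat :=
  match board with
  | [] => 0
  | r :: rs => rs.foldl (fun m row => Nat.min m row.length) r.length

-- board = [deque(filter(lambda x: x > 0, col)) for col in zip(*board)]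
-- column j of zip(*board) is [row[j] for row in board], j < min row length;
-- row.getD j 0 is exact there because j < every row's length
def pvColsA (board : List (List Int)) : List (List Int) :=
  (List.range (pvMinLen board)).map (fun j =>
    (board.map (fun row => row.getD j 0)).filter (fun x => decide (0 < x)))

-- one iteration of A's 'for move in moves' loop; state = (board-of-deques, basket, answer)
def pvStepA (st : List (List Int) × List Int × Int) (move : Int) :
    List (List Int) × List Int × Int :=
  match PySem.List.pyGet? st.1 (move - 1) with
  | none => st                      -- board[move-1]: IndexError; excluded by Pre_
  | some [] => st                   -- if not column: continue
  | some (doll :: rest) =>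
    let cols' := PySem.List.pySetD st.1 (move - 1) rest  -- column.popleft() mutates board[move-1]
    if st.2.1 ≠ [] ∧ st.2.1.getLast? = some doll then (cols', st.2.1.dropLast, st.2.2 + 2)
    else (cols', st.2.1 ++ [doll], st.2.2)

def solution (board : List (List Int)) (moves : List Int) : Int :=
  (moves.foldl pvStepA (pvColsA board, ([], 0))).2.2

-- ===== PORT B =====
-- len(board[0]) if board else 0
def pvNcols (board : List (List Int)) : Nat := (board.headD []).length

-- the 'while r < nrows and board[r][c] <= 0: r += 1' loop of Source B; board[r] is
-- board.getD r [] (exact: the guard keeps r < nrows), board[r][c] is pyGetD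
-- (exact under Pre_, which keeps c in range of every row)
def pvSkipB (board : List (List Int)) (nrows : Nat) (c : Int) (r : Nat) : Nat :=
  if r < nrows then
    if PySem.List.pyGetD (board.getD r []) c 0 ≤ 0 then pvSkipB board nrows c (r + 1) else r
  else r
termination_by nrows - r

-- one iteration of Source B's loop; state = (top, stack, answer)
def pvStepB (board : List (List Int)) (nrows : Nat)
    (st : List Nat × List Int × Int) (move : Int) : List Nat × List Int × Int :=
  let c := move - 1
  match PySem.List.pyGet? st.1 c with    -- r = top[c]
  | none => st                           -- IndexError; excluded by Pre_
  | some r0 =>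
    let r := pvSkipB board nrows c r0
    if r = nrows then (PySem.List.pySetD st.1 c r, st.2)   -- top[c] = r; continue
    else
      let doll := PySem.List.pyGetD (board.getD r []) c 0  -- doll = board[r][c]
      if st.2.1 ≠ [] ∧ st.2.1.getLast? = some doll then
        (PySem.List.pySetD st.1 c (r + 1), st.2.1.dropLast, st.2.2 + 2)
      else (PySem.List.pySetD st.1 c (r + 1), st.2.1 ++ [doll], st.2.2)

def solution_alt (board : List (List Int)) (moves : List Int) : Int :=
  (moves.foldl (pvStepB board board.length)
    (List.replicate (pvNcols board) 0, ([], 0))).2.2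

-- ===== PRECONDITION & SPEC =====
-- Pre_ excludes ragged boards (rows of unequal length), on which A's zip() silently
-- truncates every row to the shortest — a corner where either reading is defensible —
-- and moves whose index falls outside the columns, on which A raises IndexError.
def Pre_solution (board : List (List Int)) (moves : List Int) : Prop :=
  (∀ row ∈ board, row.length = (board.headD []).length) ∧
  ∀ m ∈ moves, PySem.Raise.InRange (board.headD []).length (m - 1)
instance (board : List (List Int)) (moves : List Int) : Decidable (Pre_solution board moves) := by
  unfold Pre_solution; infer_instance

def pvWitness_solution : List (List Int) × List Int :=
  ([[0, 0, 1], [2, 1, 0], [1, 2, 3]], [1, 2, 3, 2, 1, 3])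

def Spec_solution (board : List (List Int)) (moves : List Int) (out : Int) : Prop := out = solution_alt board moves
instance (board : List (List Int)) (moves : List Int) (out : Int) : Decidable (Spec_solution board moves out) := by unfold Spec_solution; infer_instance

-- ===== CLAIM (what is proved, stated in full; the proofs are below) =====
def Claim_equal_solution : Prop := ∀ (board : List (List Int)) (moves : List Int), Dom_solution board moves → Pre_solution board moves → Spec_solution board moves (solution board moves)

-- ===== LEMMAS AND PROOFS =====

-- column c of the board, as A's transpose reads it
def pvCol (board : List (List Int)) (c : Nat) : List Int :=
  board.map (fun row => row.getD c 0)

-- nat-index form of Source B's skipping loop, the bridge between the two ports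
def pvSkip (board : List (List Int)) (nrows : Nat) (c : Nat) (r : Nat) : Nat :=
  if r < nrows then
    if (board.getD r []).getD c 0 ≤ 0 then pvSkip board nrows c (r + 1) else r
  else r
termination_by nrows - r

-- the relation the loop maintains: A's deque for column j is exactly the positive
-- elements of column j from B's pointer top[j] downward
def pvInv (board : List (List Int)) (cols : List (List Int)) (top : List Nat) : Prop :=
  cols.length = pvMinLen board ∧ top.length = pvMinLen board ∧
  ∀ j, j < pvMinLen board →
    top.getD j 0 ≤ board.length ∧
    cols.getD j [] =
      ((pvCol board j).drop (top.getD j 0)).filter (fun x => decide (0 < x))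

theorem pvMinLen_rect (board : List (List Int))
    (hrect : ∀ row ∈ board, row.length = (board.headD []).length) :
    pvMinLen board = pvNcols board := by
  cases board with
  | nil => rfl
  | cons r rs =>
    have h : ∀ (l : List (List Int)), (∀ row ∈ l, row.length = r.length) →
        l.foldl (fun m row => Nat.min m row.length) r.length = r.length := by
      intro l
      induction l with
      | nil => intro _; rfl
      | cons x xs ih =>
        intro hx
        simp only [List.foldl_cons, hx x (by simp), Nat.min_self]
        exact ih (fun row hr => hx row (by simp [hr]))
    exact h rs (fun row hr => hrect row (by simp [hr]))

theorem pvRow_len (board : List (List Int))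
    (hrect : ∀ row ∈ board, row.length = (board.headD []).length)
    (r : Nat) (hr : r < board.length) :
    (board.getD r []).length = pvNcols board := by
  rw [List.getD_eq_getElem?_getD, List.getElem?_eq_getElem hr]
  exact hrect board[r] (List.getElem_mem hr)

theorem pvCol_getD (board : List (List Int)) (c r : Nat) :
    (pvCol board c).getD r 0 = (board.getD r []).getD c 0 := by
  induction board generalizing r with
  | nil => simp [pvCol]
  | cons hd tl ih => cases r <;> simp_all [pvCol]

theorem pvCol_length (board : List (List Int)) (c : Nat) :
    (pvCol board c).length = board.length := by simp [pvCol]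

theorem pvGetD_set_eq {a : Type} (xs : List a) (k : Nat) (v d : a) (h : k < xs.length) :
    (xs.set k v).getD k d = v := by
  simp [List.getD_eq_getElem?_getD, h]

theorem pvGetD_set_ne {a : Type} (xs : List a) (k k' : Nat) (v d : a) (h : k' ≠ k) :
    (xs.set k v).getD k' d = xs.getD k' d := by
  simp [List.getD_eq_getElem?_getD, List.getElem?_set_ne (by omega : k ≠ k')]

theorem pvIdx_eq (n : Nat) (i : Int) (h : -(n : Int) ≤ i ∧ i < n) :
    PySem.List.pyIdx? n i = some (if i < 0 then i + n else i).toNat ∧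
      (if i < 0 then i + n else i).toNat < n := by
  unfold PySem.List.pyIdx?
  by_cases hneg : i < 0
  · rw [if_neg (by omega), if_pos (by omega), if_pos hneg]
    exact ⟨by congr 1; omega, by omega⟩
  · rw [if_pos (by omega), if_pos (by omega), if_neg hneg]
    exact ⟨rfl, by omega⟩

theorem pvGetD_eq {a : Type} [Inhabited a] (xs : List a) (i : Int) (j n : Nat) (d : a)
    (hlen : xs.length = n) (hidx : PySem.List.pyIdx? n i = some j) (hj : j < n) :
    PySem.List.pyGetD xs i d = xs.getD j d := by
  unfold PySem.List.pyGetD PySem.List.pyGet?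
  rw [hlen, hidx]
  simp [List.getD_eq_getElem?_getD, List.getElem?_eq_getElem (by omega : j < xs.length)]

theorem pvSkipB_eq_pvSkip (board : List (List Int)) (c : Int) (j : Nat)
    (hrow : ∀ r, r < board.length → PySem.List.pyGetD (board.getD r []) c 0 =
      (board.getD r []).getD j 0) (r : Nat) :
    pvSkipB board board.length c r = pvSkip board board.length j r := by
  by_cases hr : r < board.length
  · rw [pvSkipB, pvSkip, hrow r hr]
    by_cases hz : (board.getD r []).getD j 0 ≤ 0
    · rw [if_pos hr, if_pos hz, if_pos hr, if_pos hz]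
      exact pvSkipB_eq_pvSkip board c j hrow (r + 1)
    · rw [if_pos hr, if_neg hz, if_pos hr, if_neg hz]
  · rw [pvSkipB, pvSkip, if_neg hr, if_neg hr]
termination_by board.length - r

theorem pvSkip_spec (board : List (List Int)) (c r : Nat) (h : r ≤ board.length) :
    match ((pvCol board c).drop r).filter (fun x => decide (0 < x)) with
    | [] => pvSkip board board.length c r = board.length
    | d :: rest =>
        pvSkip board board.length c r < board.length ∧
        (board.getD (pvSkip board board.length c r) []).getD c 0 = d ∧
        ((pvCol board c).drop (pvSkip board board.length c r + 1)).filter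
          (fun x => decide (0 < x)) = rest := by
  by_cases hr : r < board.length
  · have hdrop : (pvCol board c).drop r = (pvCol board c).getD r 0 :: (pvCol board c).drop (r+1) := by
      rw [List.getD_eq_getElem?_getD]
      rw [List.drop_eq_getElem_cons (by rw [pvCol_length]; exact hr)]
      simp [pvCol_length, hr]
    have hdr : ¬ (decide ((0:Int) < (pvCol board c).getD r 0) = true) ↔ ((board.getD r []).getD c 0 ≤ 0) := by
      rw [pvCol_getD]; simp only [decide_eq_true_eq, not_lt]
    rw [pvSkip]
    by_cases hz : (board.getD r []).getD c 0 ≤ 0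
    · rw [if_pos hr, if_pos hz, hdrop, List.filter_cons, if_neg (hdr.mpr hz)]
      exact pvSkip_spec board c (r+1) (by omega)
    · rw [if_pos hr, if_neg hz, hdrop, List.filter_cons,
        if_pos (by rw [pvCol_getD]; simp only [decide_eq_true_eq]; omega)]
      exact ⟨hr, (pvCol_getD board c r).symm, rfl⟩
  · have hnil : (pvCol board c).drop r = [] :=
      List.drop_eq_nil_of_le (by rw [pvCol_length]; omega)
    simp only [hnil, List.filter_nil]
    rw [pvSkip, if_neg hr]; omega
termination_by board.length - r

theorem pvStep_agree (board : List (List Int)) (m : Int)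
    (hrect : ∀ row ∈ board, row.length = (board.headD []).length)
    (cols : List (List Int)) (top : List Nat) (bk : List Int) (ans : Int)
    (hInv : pvInv board cols top)
    (hm : PySem.Raise.InRange (pvMinLen board) (m - 1)) :
    pvInv board (pvStepA (cols, bk, ans) m).1
      (pvStepB board board.length (top, bk, ans) m).1 ∧
    (pvStepA (cols, bk, ans) m).2 =
      (pvStepB board board.length (top, bk, ans) m).2 := by
  obtain ⟨hclen, htlen, hinv⟩ := hInv
  have hm' : -((pvMinLen board : Int)) ≤ m - 1 ∧ m - 1 < (pvMinLen board : Int) := hm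
  obtain ⟨hidx, hjn⟩ := pvIdx_eq (pvMinLen board) (m - 1) hm'
  set j := (if m - 1 < 0 then m - 1 + (pvMinLen board : Int) else m - 1).toNat with hjdef
  have hjc : j < cols.length := by omega
  have hjt : j < top.length := by omega
  have hgetA : PySem.List.pyGet? cols (m - 1) = some (cols.getD j []) := by
    unfold PySem.List.pyGet?
    rw [hclen, hidx]
    simp [List.getD_eq_getElem?_getD, List.getElem?_eq_getElem hjc]
  have hgetB : PySem.List.pyGet? top (m - 1) = some (top.getD j 0) := by
    unfold PySem.List.pyGet?
    rw [htlen, hidx]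
    simp [List.getD_eq_getElem?_getD, List.getElem?_eq_getElem hjt]
  have hsetA : ∀ v : List Int, PySem.List.pySetD cols (m - 1) v = cols.set j v := by
    intro v
    unfold PySem.List.pySetD PySem.List.pySet?
    rw [hclen, hidx]; rfl
  have hsetB : ∀ v : Nat, PySem.List.pySetD top (m - 1) v = top.set j v := by
    intro v
    unfold PySem.List.pySetD PySem.List.pySet?
    rw [htlen, hidx]; rfl
  have hrow : ∀ r, r < board.length → PySem.List.pyGetD (board.getD r []) (m - 1) 0 =
      (board.getD r []).getD j 0 := by
    intro r hr
    exact pvGetD_eq _ _ _ _ _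
      ((pvRow_len board hrect r hr).trans (pvMinLen_rect board hrect).symm) hidx hjn
  have hskipeq := pvSkipB_eq_pvSkip board (m - 1) j hrow (top.getD j 0)
  obtain ⟨htb, hcol⟩ := hinv j hjn
  have hskip := pvSkip_spec board j (top.getD j 0) htb
  cases hfilt : ((pvCol board j).drop (top.getD j 0)).filter (fun x => decide (0 < x)) with
  | nil =>
    rw [hfilt] at hskip
    have hAnil : cols.getD j [] = [] := by rw [hcol, hfilt]
    have hA : pvStepA (cols, bk, ans) m = (cols, bk, ans) := by
      simp only [pvStepA, hgetA, hAnil]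
    have hB : pvStepB board board.length (top, bk, ans) m =
        (top.set j board.length, bk, ans) := by
      simp only [pvStepB, hgetB, hskipeq, hskip, hsetB]
      simp
    rw [hA, hB]
    refine ⟨⟨hclen, by simp [htlen], ?_⟩, rfl⟩
    intro j' hj'
    by_cases hjj : j' = j
    · subst hjj
      rw [pvGetD_set_eq _ _ _ _ (by omega)]
      refine ⟨le_refl _, ?_⟩
      rw [hAnil, List.drop_eq_nil_of_le (by rw [pvCol_length]), List.filter_nil]
    · rw [pvGetD_set_ne _ _ _ _ _ hjj]
      exact hinv j' hj'
  | cons d rest =>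
    rw [hfilt] at hskip
    obtain ⟨hlt, hd, hrest⟩ := hskip
    have hAcol : cols.getD j [] = d :: rest := by rw [hcol, hfilt]
    have hdoll : PySem.List.pyGetD (board.getD (pvSkip board board.length j (top.getD j 0)) []) (m - 1) 0 = d := by
      rw [hrow _ hlt, hd]
    have hA : pvStepA (cols, bk, ans) m =
        (if bk ≠ [] ∧ bk.getLast? = some d then (cols.set j rest, bk.dropLast, ans + 2)
         else (cols.set j rest, bk ++ [d], ans)) := by
      simp only [pvStepA, hgetA, hAcol, hsetA]
    have hB : pvStepB board board.length (top, bk, ans) m =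
        (if bk ≠ [] ∧ bk.getLast? = some d then
            (top.set j (pvSkip board board.length j (top.getD j 0) + 1), bk.dropLast, ans + 2)
         else (top.set j (pvSkip board board.length j (top.getD j 0) + 1), bk ++ [d], ans)) := by
      simp only [pvStepB, hgetB, hskipeq,
        if_neg (show ¬ pvSkip board board.length j (top.getD j 0) = board.length by omega),
        hdoll, hsetB]
    have hInvNew : pvInv board (cols.set j rest)
        (top.set j (pvSkip board board.length j (top.getD j 0) + 1)) := by
      refine ⟨by simp [hclen], by simp [htlen], ?_⟩
      intro j' hj'
      by_cases hjj : j' = j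
      · subst hjj
        rw [pvGetD_set_eq _ _ _ _ (by omega), pvGetD_set_eq _ _ _ _ (by omega)]
        exact ⟨by omega, hrest.symm⟩
      · rw [pvGetD_set_ne _ _ _ _ _ hjj, pvGetD_set_ne _ _ _ _ _ hjj]
        exact hinv j' hj'
    rw [hA, hB]
    by_cases hb : bk ≠ [] ∧ bk.getLast? = some d
    · rw [if_pos hb, if_pos hb]
      exact ⟨hInvNew, rfl⟩
    · rw [if_neg hb, if_neg hb]
      exact ⟨hInvNew, rfl⟩

theorem pvFold_agree (board : List (List Int)) (moves : List Int)
    (hrect : ∀ row ∈ board, row.length = (board.headD []).length)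
    (cols : List (List Int)) (top : List Nat) (bk : List Int) (ans : Int)
    (hInv : pvInv board cols top)
    (hmv : ∀ m ∈ moves, PySem.Raise.InRange (pvMinLen board) (m - 1)) :
    (moves.foldl pvStepA (cols, bk, ans)).2 =
      (moves.foldl (pvStepB board board.length) (top, bk, ans)).2 := by
  induction moves generalizing cols top bk ans with
  | nil => rfl
  | cons m ms ih =>
    simp only [List.foldl_cons]
    obtain ⟨hInv', heq⟩ := pvStep_agree board m hrect cols top bk ans hInv (hmv m (by simp))
    have h := ih (pvStepA (cols, bk, ans) m).1
      (pvStepB board board.length (top, bk, ans) m).1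
      (pvStepA (cols, bk, ans) m).2.1 (pvStepA (cols, bk, ans) m).2.2
      hInv' (fun x hx => hmv x (List.mem_cons_of_mem m hx))
    have e : ((pvStepB board board.length (top, bk, ans) m).1,
        (pvStepA (cols, bk, ans) m).2) =
        pvStepB board board.length (top, bk, ans) m := by rw [heq]
    simpa [e] using h

theorem pvInv_init (board : List (List Int)) :
    pvInv board (pvColsA board) (List.replicate (pvMinLen board) 0) := by
  refine ⟨by simp [pvColsA], by simp, ?_⟩
  intro j hj
  refine ⟨by simp [List.getD_eq_getElem?_getD, hj], ?_⟩
  simp [pvColsA, pvCol, List.getD_eq_getElem?_getD, hj]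

-- ===== VERDICT (by name: the statement is the Claim_ definition above) =====
theorem solution_spec : Claim_equal_solution := by
  intro board moves _ hpre
  obtain ⟨hrect, hmv⟩ := hpre
  unfold Spec_solution solution solution_alt
  rw [← pvMinLen_rect board hrect]
  exact congrArg Prod.snd (
    (pvFold_agree board moves hrect _ _ [] 0 (pvInv_init board)
      (fun m hm => by rw [pvMinLen_rect board hrect]; exact hmv m hm)))
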